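-- pv_equiv track=rewrite | github.com/fujihiraryo/google-code-jam | 2021/Round1A/AppendSort/sol12.py | count3
-- ===== SOURCE A (Python) =====
-- def count2(x0, x1):
--     if x0 < x1:
--         return 0
--     for a in range(10):
--         if x0 < 10 * x1 + a:
--             return 1
--     for a in range(10):
--         for b in range(10):
--             if x0 < 100 * x1 + 10 * a + b:
--                 return 2
--     return 3
--
-- def count3(x0, x1, x2):
--     cnt = 5
--     if x0 < x1:
--         cnt = min(cnt, count2(x1, x2))
--     for a in range(10):
--         if x0 < 10 * x1 + a:
--             cnt = min(cnt, 1 + count2(10 * x1 + a, x2))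
--     for a in range(10):
--         for b in range(10):
--             if x0 < 100 * x1 + 10 * a + b:
--                 cnt = min(cnt, 2 + count2(100 * x1 + 10 * a + b, x2))
--     return cnt
-- ===== SOURCE B (Python) =====
-- def count2(x0, x1):
--     # smallest number of appended digits d in {0,1,2}: after appending d digits to x1
--     # the largest reachable value is (x1+1)*10**d - 1; else fall back to 3 like A.
--     for d in range(3):
--         if x0 < (x1 + 1) * 10 ** d - 1:
--             return d
--     return 3
--
-- def count3(x0, x1, x2):
--     cnt = 5
--     if x0 < x1:
--         cnt = min(cnt, count2(x1, x2))
--     v1 = max(10 * x1, x0 + 1)          # smallest 1-digit-append candidate exceeding x0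
--     if v1 <= 10 * x1 + 9:
--         cnt = min(cnt, 1 + count2(v1, x2))
--     v2 = max(100 * x1, x0 + 1)         # smallest 2-digit-append candidate exceeding x0
--     if v2 <= 100 * x1 + 99:
--         cnt = min(cnt, 2 + count2(v2, x2))
--     return cnt
-- ===== Notes on version B (the rewrite author's own statement) =====
-- stated objective: faster
-- what changed: Replaced A's brute-force enumeration of all 10 one-digit and 100 two-digit append candidates (each recursing into a scanning count2) with a closed-form computation of the single smallest candidate of each length (v = max(base, x0+1)) plus a threshold-based count2, using monotonicity of count2 in its first argument.
import Mathlib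
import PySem

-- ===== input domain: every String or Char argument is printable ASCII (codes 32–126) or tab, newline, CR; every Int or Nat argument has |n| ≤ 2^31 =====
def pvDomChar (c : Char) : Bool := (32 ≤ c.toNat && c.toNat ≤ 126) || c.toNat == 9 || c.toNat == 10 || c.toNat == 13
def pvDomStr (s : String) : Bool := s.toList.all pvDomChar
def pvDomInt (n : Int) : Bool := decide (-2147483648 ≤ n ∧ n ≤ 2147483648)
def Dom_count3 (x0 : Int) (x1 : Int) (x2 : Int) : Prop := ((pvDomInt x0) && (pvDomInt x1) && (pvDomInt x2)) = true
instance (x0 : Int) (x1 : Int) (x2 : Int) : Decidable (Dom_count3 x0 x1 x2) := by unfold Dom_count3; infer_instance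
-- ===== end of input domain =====

-- B replaces A's brute-force enumeration of all append candidates by the single smallest
-- candidate of each length (closed form), using monotonicity of count2; objective: faster (constant factor).


-- ===== PORT A =====
-- helper count2 of A: the early-return 'for' loops become 'any' over the same ranges
def count2 (x0 : Int) (x1 : Int) : Int :=
  if x0 < x1 then 0
  else if (PySem.List.pyRange 0 10 1).any (fun a => decide (x0 < 10 * x1 + a)) then 1
  else if (PySem.List.pyRange 0 10 1).any (fun a =>
         (PySem.List.pyRange 0 10 1).any (fun b => decide (x0 < 100 * x1 + 10 * a + b))) then 2
  else 3

def count3 (x0 : Int) (x1 : Int) (x2 : Int) : Int :=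
  let cnt : Int := 5
  let cnt := if x0 < x1 then min cnt (count2 x1 x2) else cnt
  let cnt := (PySem.List.pyRange 0 10 1).foldl
    (fun c a => if x0 < 10 * x1 + a then min c (1 + count2 (10 * x1 + a) x2) else c) cnt
  let cnt := (PySem.List.pyRange 0 10 1).foldl
    (fun c a => (PySem.List.pyRange 0 10 1).foldl
      (fun c b => if x0 < 100 * x1 + 10 * a + b then min c (2 + count2 (100 * x1 + 10 * a + b) x2) else c) c) cnt
  cnt

-- ===== PORT B =====
-- helper count2 of B: first d in range(3) with x0 < (x1+1)*10**d - 1, else 3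
-- ('10 ** d' is exact as '10 ^ d.toNat' since every d produced by range(3) is nonnegative)
def count2_alt (x0 : Int) (x1 : Int) : Int :=
  match (PySem.List.pyRange 0 3 1).find? (fun d => decide (x0 < (x1 + 1) * 10 ^ d.toNat - 1)) with
  | some d => d
  | none => 3

def count3_alt (x0 : Int) (x1 : Int) (x2 : Int) : Int :=
  let cnt : Int := 5
  let cnt := if x0 < x1 then min cnt (count2_alt x1 x2) else cnt
  let v1 := max (10 * x1) (x0 + 1)
  let cnt := if v1 ≤ 10 * x1 + 9 then min cnt (1 + count2_alt v1 x2) else cnt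
  let v2 := max (100 * x1) (x0 + 1)
  let cnt := if v2 ≤ 100 * x1 + 99 then min cnt (2 + count2_alt v2 x2) else cnt
  cnt

-- ===== PRECONDITION & SPEC =====
def Spec_count3 (x0 : Int) (x1 : Int) (x2 : Int) (out : Int) : Prop := out = count3_alt x0 x1 x2
instance (x0 : Int) (x1 : Int) (x2 : Int) (out : Int) : Decidable (Spec_count3 x0 x1 x2 out) := by unfold Spec_count3; infer_instance

-- ===== CLAIM (what is proved, stated in full; the proofs are below) =====
def Claim_equal_count3 : Prop := ∀ (x0 : Int) (x1 : Int) (x2 : Int), Dom_count3 x0 x1 x2 → Spec_count3 x0 x1 x2 (count3 x0 x1 x2)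

-- ===== LEMMAS AND PROOFS =====

-- closed form shared by both count2 implementations
def cf (x0 : Int) (x1 : Int) : Int :=
  if x0 < x1 then 0 else if x0 < 10 * x1 + 9 then 1 else if x0 < 100 * x1 + 99 then 2 else 3

theorem count2_eq_cf (x0 x1 : Int) : count2 x0 x1 = cf x0 x1 := by
  have hr : PySem.List.pyRange 0 10 1 = [0,1,2,3,4,5,6,7,8,9] := by decide
  have h1 : ((PySem.List.pyRange 0 10 1).any (fun a => decide (x0 < 10 * x1 + a)) = true)
      ↔ x0 < 10 * x1 + 9 := by
    rw [hr]; simp [List.any_cons]; omega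
  have h2 : ((PySem.List.pyRange 0 10 1).any (fun a =>
        (PySem.List.pyRange 0 10 1).any (fun b => decide (x0 < 100 * x1 + 10 * a + b))) = true)
      ↔ x0 < 100 * x1 + 99 := by
    rw [hr]; simp [List.any_cons]; omega
  unfold count2 cf
  by_cases h : x0 < x1
  · simp [h]
  · rw [if_neg h, if_neg h]
    by_cases hb : x0 < 10 * x1 + 9
    · rw [if_pos (h1.mpr hb), if_pos hb]
    · rw [if_neg (fun hh => hb (h1.mp hh)), if_neg hb]
      by_cases hc : x0 < 100 * x1 + 99
      · rw [if_pos (h2.mpr hc), if_pos hc]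
      · rw [if_neg (fun hh => hc (h2.mp hh)), if_neg hc]

theorem count2_alt_eq_cf (x0 x1 : Int) : count2_alt x0 x1 = cf x0 x1 := by
  have hr : PySem.List.pyRange 0 3 1 = [0,1,2] := by decide
  have p0 : (x1 + 1) * 10 ^ (0 : Int).toNat - 1 = x1 := by norm_num
  have p1 : (x1 + 1) * 10 ^ (1 : Int).toNat - 1 = 10 * x1 + 9 := by
    have h : (10 : Int) ^ (1 : Int).toNat = 10 := by decide
    rw [h]; ring
  have p2 : (x1 + 1) * 10 ^ (2 : Int).toNat - 1 = 100 * x1 + 99 := by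
    have h : (10 : Int) ^ (2 : Int).toNat = 100 := by decide
    rw [h]; ring
  unfold count2_alt cf
  rw [hr]
  simp only [List.find?, p0, p1, p2]
  by_cases h0 : x0 < x1 <;> by_cases h1 : x0 < 10 * x1 + 9 <;> by_cases h2 : x0 < 100 * x1 + 99 <;>
    simp [h0, h1, h2]

theorem cf_mono (x : Int) {v w : Int} (h : v ≤ w) : cf v x ≤ cf w x := by
  unfold cf; split_ifs <;> omega

-- the min-accumulating loop over range(0,n) with an upward-closed guard and a
-- monotone payload equals a single min at the first qualifying index i0
theorem fold_min_nat (step : Int → Int → Int) (cond : Int → Prop) [DecidablePred cond]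
    (g : Int → Int)
    (hstep : ∀ c i, step c i = if cond i then min c (g i) else c)
    (hup : ∀ i j : Int, i ≤ j → cond i → cond j)
    (hg : ∀ i j : Int, i ≤ j → cond i → g i ≤ g j)
    (i0 : Int) (h0 : 0 ≤ i0) (hc : cond i0) (hmin : ∀ j : Int, 0 ≤ j → cond j → i0 ≤ j) :
    ∀ (n : ℕ) (c0 : Int),
      (PySem.List.pyRange 0 (n : Int) 1).foldl step c0
        = if i0 < (n : Int) then min c0 (g i0) else c0 := by
  intro n
  induction n with
  | zero =>
    intro c0
    rw [PySem.List.pyRange_one_eq_nil (by norm_num)]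
    simp only [List.foldl_nil]
    rw [if_neg (by omega)]
  | succ n ih =>
    intro c0
    have hcast : ((n + 1 : ℕ) : Int) = (n : Int) + 1 := by push_cast; ring
    rw [hcast, PySem.List.pyRange_one_succ_right (by positivity), List.foldl_append,
        List.foldl_cons, List.foldl_nil, ih, hstep]
    by_cases hcn : cond (n : Int)
    · have hi0n : i0 ≤ (n : Int) := hmin _ (by positivity) hcn
      by_cases hlt : i0 < (n : Int)
      · rw [if_pos hlt, if_pos hcn, if_pos (by omega)]
        rw [min_assoc, min_eq_left (hg i0 (n : Int) (by omega) hc)]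
      · have : i0 = (n : Int) := by omega
        rw [if_neg hlt, if_pos hcn, if_pos (by omega), this]
    · have : ¬ i0 < (n : Int) := fun hlt => hcn (hup i0 _ (by omega) hc)
      have h1 : ¬ i0 < (n : Int) + 1 := by
        intro hlt
        exact hcn (hup i0 _ (by omega) hc)
      rw [if_neg this, if_neg hcn, if_neg h1]

theorem fold_min_int (step : Int → Int → Int) (cond : Int → Prop) [DecidablePred cond]
    (g : Int → Int)
    (hstep : ∀ c i, step c i = if cond i then min c (g i) else c)
    (hup : ∀ i j : Int, i ≤ j → cond i → cond j)
    (hg : ∀ i j : Int, i ≤ j → cond i → g i ≤ g j)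
    (i0 : Int) (h0 : 0 ≤ i0) (hc : cond i0) (hmin : ∀ j : Int, 0 ≤ j → cond j → i0 ≤ j)
    (n : Int) (hn : 0 ≤ n) (c0 : Int) :
    (PySem.List.pyRange 0 n 1).foldl step c0 = if i0 < n then min c0 (g i0) else c0 := by
  have hrw : n = ((n.toNat : ℕ) : Int) := by omega
  rw [hrw]
  exact fold_min_nat step cond g hstep hup hg i0 h0 hc hmin n.toNat c0

-- least nonnegative integer satisfying an upward-closed decidable condition
theorem exists_least (cond : Int → Prop) [DecidablePred cond]
    (hne : ∃ k : ℕ, cond (k : Int)) :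
    ∃ i0 : Int, 0 ≤ i0 ∧ cond i0 ∧ ∀ j : Int, 0 ≤ j → cond j → i0 ≤ j := by
  refine ⟨(Nat.find hne : ℕ), by positivity, Nat.find_spec hne, ?_⟩
  intro j hj hcj
  have hj' : cond ((j.toNat : ℕ) : Int) := by rwa [Int.toNat_of_nonneg hj]
  have := Nat.find_le (p := fun k : ℕ => cond (k : Int)) (h := hne) hj'
  omega

theorem count3_eq (x0 x1 x2 : Int) : count3 x0 x1 x2 = count3_alt x0 x1 x2 := by
  -- first loop: first qualifying index is max 0 (x0 - 10*x1 + 1)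
  have L1 := fold_min_int
    (fun c a => if x0 < 10 * x1 + a then min c (1 + count2 (10 * x1 + a) x2) else c)
    (fun a => x0 < 10 * x1 + a) (fun a => 1 + count2 (10 * x1 + a) x2)
    (fun c i => rfl) (fun i j hij hi => by omega)
    (fun i j hij _ => by
      have := cf_mono x2 (show 10 * x1 + i ≤ 10 * x1 + j by omega)
      simp only [count2_eq_cf]; omega)
    (max 0 (x0 - 10 * x1 + 1)) (by omega) (by omega) (fun j hj hcj => by omega)
    10 (by norm_num)
  -- inner second loop, for each a
  have Lin : (fun (c : Int) (a : Int) => (PySem.List.pyRange 0 10 1).foldl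
      (fun c b => if x0 < 100 * x1 + 10 * a + b then min c (2 + count2 (100 * x1 + 10 * a + b) x2) else c) c)
      = (fun (c : Int) (a : Int) =>
          if max 0 (x0 - (100 * x1 + 10 * a) + 1) < 10
          then min c (2 + count2 (100 * x1 + 10 * a + max 0 (x0 - (100 * x1 + 10 * a) + 1)) x2)
          else c) := by
    funext c a
    exact fold_min_int
      (fun c b => if x0 < 100 * x1 + 10 * a + b then min c (2 + count2 (100 * x1 + 10 * a + b) x2) else c)
      (fun b => x0 < 100 * x1 + 10 * a + b) (fun b => 2 + count2 (100 * x1 + 10 * a + b) x2)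
      (fun c i => rfl) (fun i j hij hi => by omega)
      (fun i j hij _ => by
        have := cf_mono x2 (show 100 * x1 + 10 * a + i ≤ 100 * x1 + 10 * a + j by omega)
        simp only [count2_eq_cf]; omega)
      (max 0 (x0 - (100 * x1 + 10 * a) + 1)) (by omega) (by omega) (fun j hj hcj => by omega)
      10 (by norm_num) c
  -- outer second loop: get the least qualifying a
  obtain ⟨i0, h0, hc, hmin⟩ := exists_least (fun a => max 0 (x0 - (100 * x1 + 10 * a) + 1) < 10)
    ⟨(x0 - 100 * x1).toNat, by omega⟩
  have L2 := fold_min_int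
    (fun (c : Int) (a : Int) =>
        if max 0 (x0 - (100 * x1 + 10 * a) + 1) < 10
        then min c (2 + count2 (100 * x1 + 10 * a + max 0 (x0 - (100 * x1 + 10 * a) + 1)) x2)
        else c)
    (fun a => max 0 (x0 - (100 * x1 + 10 * a) + 1) < 10)
    (fun a => 2 + count2 (100 * x1 + 10 * a + max 0 (x0 - (100 * x1 + 10 * a) + 1)) x2)
    (fun c i => rfl) (fun i j hij hi => by omega)
    (fun i j hij hi => by
      have := cf_mono x2 (show 100 * x1 + 10 * i + max 0 (x0 - (100 * x1 + 10 * i) + 1)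
          ≤ 100 * x1 + 10 * j + max 0 (x0 - (100 * x1 + 10 * j) + 1) by omega)
      simp only [count2_eq_cf]; omega)
    i0 h0 hc hmin 10 (by norm_num)
  -- minimality facts about i0 needed for the value and the guard
  have hprev : i0 = 0 ∨ ¬ (max 0 (x0 - (100 * x1 + 10 * (i0 - 1)) + 1) < 10) := by
    by_cases h : i0 = 0
    · exact Or.inl h
    · right; intro hcp
      have := hmin (i0 - 1) (by omega) hcp
      omega
  simp only [count3, count3_alt, Lin]
  rw [L1, L2]
  -- now everything is arithmetic on cf
  simp only [count2_eq_cf, count2_alt_eq_cf]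
  have e1 : 10 * x1 + max 0 (x0 - 10 * x1 + 1) = max (10 * x1) (x0 + 1) := by omega
  have g1 : (max 0 (x0 - 10 * x1 + 1) < 10) ↔ (max (10 * x1) (x0 + 1) ≤ 10 * x1 + 9) := by omega
  by_cases hlt : i0 < 10
  · have e2 : 100 * x1 + 10 * i0 + max 0 (x0 - (100 * x1 + 10 * i0) + 1)
        = max (100 * x1) (x0 + 1) := by rcases hprev with h | h <;> omega
    have g2 : max (100 * x1) (x0 + 1) ≤ 100 * x1 + 99 := by omega
    rw [if_pos hlt, e2, if_pos g2, e1]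
    by_cases hb : max 0 (x0 - 10 * x1 + 1) < 10
    · rw [if_pos hb, if_pos (g1.mp hb)]
    · rw [if_neg hb, if_neg (fun hh => hb (g1.mpr hh))]
  · have g2 : ¬ (max (100 * x1) (x0 + 1) ≤ 100 * x1 + 99) := by
      intro hh
      have h9 := hmin 9 (by norm_num) (by omega)
      omega
    rw [if_neg hlt, if_neg g2, e1]
    by_cases hb : max 0 (x0 - 10 * x1 + 1) < 10
    · rw [if_pos hb, if_pos (g1.mp hb)]
    · rw [if_neg hb, if_neg (fun hh => hb (g1.mpr hh))]

-- ===== VERDICT (by name: the statement is the Claim_ definition above) =====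
theorem count3_spec : Claim_equal_count3 := by
  intro x0 x1 x2 _
  unfold Spec_count3
  exact count3_eq x0 x1 x2
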